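-- pv_equiv track=rewrite | github.com/Cosmina02/AI | map_coloring/main.py | get_index_least_constraint
-- ===== SOURCE A (Python) =====
-- def get_index_least_constraint(colors):
--     smallest = -1
--     region_index = -1
--     for x in colors:
--         if (smallest > len(x) or smallest == -1) and len(x) != 0:
--             smallest = len(x)
--             region_index = colors.index(x)
--     return region_index
-- ===== SOURCE B (Python) =====
-- def get_index_least_constraint(colors):
--     lengths = [len(x) for x in colors if len(x) != 0]
--     if not lengths:
--         return -1
--     m = min(lengths)
--     for i, x in enumerate(colors):
--         if len(x) == m:
--             return i
--     return -1
-- ===== Notes on version B (the rewrite author's own statement) =====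
-- stated objective: simpler
-- what changed: Replaces A's single fused scan that maintains a running minimum and re-scans the list with colors.index on every improvement by two plain passes: first take the minimum non-empty length, then return the first index attaining it.
import Mathlib
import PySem

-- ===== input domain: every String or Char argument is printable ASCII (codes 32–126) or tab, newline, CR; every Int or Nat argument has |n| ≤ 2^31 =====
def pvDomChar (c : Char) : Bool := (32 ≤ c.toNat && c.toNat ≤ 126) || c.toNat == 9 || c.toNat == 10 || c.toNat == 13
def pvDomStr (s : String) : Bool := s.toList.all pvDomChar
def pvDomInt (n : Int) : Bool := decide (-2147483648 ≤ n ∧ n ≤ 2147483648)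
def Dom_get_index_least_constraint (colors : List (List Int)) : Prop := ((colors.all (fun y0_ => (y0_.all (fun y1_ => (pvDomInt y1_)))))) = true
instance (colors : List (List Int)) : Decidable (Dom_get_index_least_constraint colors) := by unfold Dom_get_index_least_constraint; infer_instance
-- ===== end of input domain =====

-- B replaces A's fused min-tracking scan (with its colors.index rescans) by two plain passes:
-- min of the non-empty lengths, then the first index attaining it — simpler, same values.


-- ===== PORT A =====
-- loop body of A's for-loop, as a named step function; colors.index(x) is PySem.List.index?
def pvStep (colors : List (List Int)) (st : Int × Int) (x : List Int) : Int × Int :=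
  if (st.1 > (x.length : Int) ∨ st.1 = -1) ∧ x.length ≠ 0 then
    ((x.length : Int), (((PySem.List.index? colors x).getD 0 : Nat) : Int))
  else st

def get_index_least_constraint (colors : List (List Int)) : Int :=
  (colors.foldl (pvStep colors) (-1, -1)).2

-- ===== PORT B =====
-- B's second pass: first index i with len(x) == m, -1 if none
def pvFindFirstLen (m : Int) : List (List Int) → Int → Int
  | [], _ => -1
  | x :: rest, i => if (x.length : Int) = m then i else pvFindFirstLen m rest (i + 1)

def get_index_least_constraint_alt (colors : List (List Int)) : Int :=
  let lengths := (colors.filter (fun x => x.length ≠ 0)).map (fun x => (x.length : Int))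
  match PySem.List.min? lengths (fun v => v) with
  | none => -1
  | some m => pvFindFirstLen m colors 0

-- ===== PRECONDITION & SPEC =====
def Spec_get_index_least_constraint (colors : List (List Int)) (out : Int) : Prop := out = get_index_least_constraint_alt colors
instance (colors : List (List Int)) (out : Int) : Decidable (Spec_get_index_least_constraint colors out) := by unfold Spec_get_index_least_constraint; infer_instance

-- ===== CLAIM (what is proved, stated in full; the proofs are below) =====
def Claim_equal_get_index_least_constraint : Prop := ∀ (colors : List (List Int)), Dom_get_index_least_constraint colors → Spec_get_index_least_constraint colors (get_index_least_constraint colors)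

-- ===== LEMMAS AND PROOFS =====

-- minimum of the non-empty lengths of p (exactly B's first pass)
def pvMinNZ (p : List (List Int)) : Option Int :=
  PySem.List.min? ((p.filter (fun x => x.length ≠ 0)).map (fun x => (x.length : Int))) (fun v => v)

-- the state A's loop holds after processing prefix p
def pvState (p : List (List Int)) : Int × Int :=
  match pvMinNZ p with
  | none => (-1, -1)
  | some m => (m, pvFindFirstLen m p 0)

lemma min?_id_append_singleton (l : List Int) (d : Int) :
    PySem.List.min? (l ++ [d]) (fun v => v) =
      some (match PySem.List.min? l (fun v => v) with | none => d | some m => min m d) := by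
  cases l with
  | nil => simp [PySem.List.min?_id_cons, (PySem.List.min?_eq_none_iff ([]:List Int) (fun v => v)).2 rfl]
  | cons c t =>
      rw [List.cons_append, PySem.List.min?_id_cons, PySem.List.min?_id_cons]
      simp [List.foldl_append]

lemma mz_none_iff (p : List (List Int)) : pvMinNZ p = none ↔ ∀ y ∈ p, y.length = 0 := by
  unfold pvMinNZ
  rw [PySem.List.min?_eq_none_iff]
  simp [List.filter_eq_nil_iff]

lemma mz_some_props (p : List (List Int)) (m : Int) (h : pvMinNZ p = some m) :
    (∃ y ∈ p, y.length ≠ 0 ∧ (y.length : Int) = m) ∧ (∀ y ∈ p, y.length ≠ 0 → m ≤ (y.length : Int)) := by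
  unfold pvMinNZ at h
  constructor
  · have hmem := PySem.List.min?_mem h
    simp only [List.mem_map, List.mem_filter] at hmem
    obtain ⟨y, ⟨hy, h0⟩, he⟩ := hmem
    exact ⟨y, hy, by simpa using h0, he⟩
  · intro y hy h0
    have := PySem.List.min?_isMin h ((y.length : Int))
      (by simp only [List.mem_map, List.mem_filter]; exact ⟨y, ⟨hy, by simpa using h0⟩, rfl⟩)
    simpa using this

lemma mz_append_zero (p : List (List Int)) (x : List Int) (hx : x.length = 0) :
    pvMinNZ (p ++ [x]) = pvMinNZ p := by
  unfold pvMinNZ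
  simp [List.filter_append, List.length_eq_zero_iff.1 hx]

lemma mz_append_nonzero (p : List (List Int)) (x : List Int) (hx : x.length ≠ 0) :
    pvMinNZ (p ++ [x]) =
      some (match pvMinNZ p with | none => (x.length : Int) | some m => min m (x.length : Int)) := by
  unfold pvMinNZ
  rw [List.filter_append]
  simp only [List.filter_cons, List.filter_nil, hx, decide_true, ne_eq, not_false_iff, if_true]
  rw [List.map_append]
  simpa using min?_id_append_singleton ((p.filter (fun x => x.length ≠ 0)).map (fun x => (x.length : Int))) (x.length : Int)

lemma ff_append_of_mem (m : Int) (p s : List (List Int)) (i : Int)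
    (h : ∃ y ∈ p, (y.length : Int) = m) :
    pvFindFirstLen m (p ++ s) i = pvFindFirstLen m p i := by
  induction p generalizing i with
  | nil => simp at h
  | cons y p ih =>
      simp only [List.cons_append, pvFindFirstLen]
      by_cases hy : (y.length : Int) = m
      · simp [hy]
      · rw [if_neg hy, if_neg hy]
        apply ih
        obtain ⟨z, hz, he⟩ := h
        rcases List.mem_cons.1 hz with rfl | hz'
        · exact absurd he hy
        · exact ⟨z, hz', he⟩

lemma ff_append_none (m : Int) (p : List (List Int)) (x : List Int) (i : Int)
    (h : ∀ y ∈ p, (y.length : Int) ≠ m) (hx : (x.length : Int) = m) :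
    pvFindFirstLen m (p ++ [x]) i = i + (p.length : Int) := by
  induction p generalizing i with
  | nil => simp [pvFindFirstLen, hx]
  | cons y p ih =>
      have hy := h y (List.mem_cons_self ..)
      simp only [List.cons_append, pvFindFirstLen, if_neg hy]
      rw [ih (h := fun z hz => h z (List.mem_cons_of_mem _ hz))]
      simp only [List.length_cons]
      push_cast
      ring

lemma step_eq (p : List (List Int)) (x : List Int) (s : List (List Int)) :
    pvStep (p ++ x :: s) (pvState p) x = pvState (p ++ [x]) := by
  unfold pvStep pvState
  cases hm : pvMinNZ p with
  | none =>
      have hall : ∀ y ∈ p, y.length = 0 := (mz_none_iff p).1 hm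
      by_cases hx : x.length = 0
      · rw [mz_append_zero p x hx, hm]
        simp [hx]
      · have hnot : x ∉ p := fun hmem => hx (hall x hmem)
        have hidx : PySem.List.index? (p ++ x :: s) x = some p.length := by
          rw [show p ++ x :: s = (p ++ [x]) ++ s by simp,
              PySem.List.index?_append_of_mem _ (by simp),
              PySem.List.index?_append_singleton_self p x hnot]
        rw [mz_append_nonzero p x hx, hm]
        simp only [hidx]
        simp [hx]
        rw [ff_append_none _ p x 0 (fun y hy => by simp [hall y hy]; omega) rfl]
        simp
  | some m =>
      obtain ⟨⟨y0, hy0, hy0n, hy0e⟩, hmin⟩ := mz_some_props p m hm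
      have hm1 : (1 : Int) ≤ m := by
        have : 1 ≤ y0.length := Nat.pos_of_ne_zero hy0n
        omega
      by_cases hx : x.length = 0
      · rw [mz_append_zero p x hx, hm]
        simp [hx]
        rw [ff_append_of_mem m p [x] 0 ⟨y0, hy0, hy0e⟩]
      · by_cases hlt : (x.length : Int) < m
        · have hnot : x ∉ p := by
            intro hmem
            by_cases h0 : x.length = 0
            · exact hx h0
            · have := hmin x hmem h0; omega
          have hidx : PySem.List.index? (p ++ x :: s) x = some p.length := by
            rw [show p ++ x :: s = (p ++ [x]) ++ s by simp,
                PySem.List.index?_append_of_mem _ (by simp),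
                PySem.List.index?_append_singleton_self p x hnot]
          rw [mz_append_nonzero p x hx, hm]
          have hne : ∀ y ∈ p, (y.length : Int) ≠ (x.length : Int) := by
            intro y hy
            by_cases h0 : y.length = 0
            · simp [h0]; omega
            · have := hmin y hy h0; omega
          simp only [hidx]
          simp [hx, hlt, min_eq_right hlt.le]
          rw [ff_append_none _ p x 0 hne rfl]
          simp
        · have hge : m ≤ (x.length : Int) := not_lt.1 hlt
          rw [mz_append_nonzero p x hx, hm]
          simp [min_eq_left hge]
          rw [ff_append_of_mem m p [x] 0 ⟨y0, hy0, hy0e⟩]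
          rw [if_neg]
          rintro ⟨h1 | h2, _⟩
          · omega
          · omega

lemma fold_gen (colors : List (List Int)) :
    ∀ (s p : List (List Int)), colors = p ++ s →
      s.foldl (pvStep colors) (pvState p) = pvState (p ++ s) := by
  intro s
  induction s with
  | nil => intro p _; simp
  | cons x s ih =>
      intro p hc
      have h1 : pvStep colors (pvState p) x = pvState (p ++ [x]) := by
        rw [hc]; exact step_eq p x s
      have h2 := ih (p ++ [x]) (by simpa using hc)
      simp only [List.foldl_cons, h1, h2]
      simp

lemma a_eq_state (colors : List (List Int)) :
    get_index_least_constraint colors = (pvState colors).2 := by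
  unfold get_index_least_constraint
  have h0 : pvState [] = (-1, -1) := rfl
  have := fold_gen colors colors [] rfl
  simp only [List.nil_append] at this
  rw [h0] at this
  rw [this]

lemma b_eq_state (colors : List (List Int)) :
    get_index_least_constraint_alt colors = (pvState colors).2 := by
  unfold get_index_least_constraint_alt pvState pvMinNZ
  cases h : PySem.List.min? ((colors.filter (fun x => x.length ≠ 0)).map (fun x => (x.length : Int))) (fun v => v) with
  | none => simp only [h]
  | some m => simp only [h]

-- ===== VERDICT (by name: the statement is the Claim_ definition above) =====
theorem get_index_least_constraint_spec : Claim_equal_get_index_least_constraint := by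
  intro colors _
  unfold Spec_get_index_least_constraint
  rw [a_eq_state, b_eq_state]
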